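-- pv_equiv track=rewrite | github.com/jingmu123/inf_data_quality_control | datasets/journal-pile/iter3/journal-pile.py | Continuous_phrase_clean
-- ===== SOURCE A (Python) =====
-- def Continuous_phrase_clean(context):
--     Continuous_phrase_index = []
--     Continuous_phrase_len = []
--
--     # 记录每个片段的index和长度
--     for index, item in enumerate(context):
--         Continuous_phrase_index.append(index)
--         Continuous_phrase_len.append(len(item.split()))
--
--     # 检查是否有连续5个及以上长度小于20的片段
--     del_indices = []  # 记录需要删除的index
--     temp_indices = []  # 临时存储符合条件的index
--
--     for i, length in enumerate(Continuous_phrase_len):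
--         if length < 20:
--             temp_indices.append(Continuous_phrase_index[i])
--         else:
--             # 如果temp_indices中有连续5个及以上的片段，记录这些index
--             if len(temp_indices) >= 5:
--                 del_indices.extend(temp_indices)
--             temp_indices = []  # 重置
--
--     # 如果最后一段也是连续的，检查并添加到删除index
--     if len(temp_indices) >= 5:
--         del_indices.extend(temp_indices)
--
--     # 根据del_indices删除context中对应的片段
--     cleaned_context = [item for i, item in enumerate(context) if i not in del_indices]
--
--     return cleaned_context
-- ===== SOURCE B (Python) =====
-- def Continuous_phrase_clean(context):
--     # Single grouping pass: walk maximal runs of equal "shortness" (len(x.split()) < 20)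
--     # and drop any short run of length >= 5; no index/length arrays, no membership filter.
--     out = []
--     i, n = 0, len(context)
--     while i < n:
--         k = len(context[i].split()) < 20
--         j = i + 1
--         while j < n and (len(context[j].split()) < 20) == k:
--             j += 1
--         if not (k and j - i >= 5):
--             out.extend(context[i:j])
--         i = j
--     return out
-- ===== Notes on version B (the rewrite author's own statement) =====
-- stated objective: simpler
-- what changed: Replaces A's index/length arrays, temp/del_indices accumulation and the final 'i not in del_indices' membership-filter pass with a single pass over maximal runs of equal shortness (len(x.split()) < 20) that skips short runs of length >= 5 directly.
import Mathlib
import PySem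

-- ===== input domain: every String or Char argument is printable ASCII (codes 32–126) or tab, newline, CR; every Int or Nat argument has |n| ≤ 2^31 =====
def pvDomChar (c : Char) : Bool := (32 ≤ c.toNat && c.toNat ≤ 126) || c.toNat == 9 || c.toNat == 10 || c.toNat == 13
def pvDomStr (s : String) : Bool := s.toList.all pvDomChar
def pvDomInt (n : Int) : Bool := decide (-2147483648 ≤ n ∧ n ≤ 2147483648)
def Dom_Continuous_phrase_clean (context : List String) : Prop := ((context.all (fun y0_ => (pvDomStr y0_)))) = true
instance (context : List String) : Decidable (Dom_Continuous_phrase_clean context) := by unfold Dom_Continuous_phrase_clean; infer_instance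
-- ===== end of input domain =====

-- B replaces A's index/length arrays, temp/del_indices bookkeeping and the final
-- index-membership filter pass by one pass over maximal runs of equal "shortness"
-- that skips short runs of length ≥ 5 directly (objective: simpler/faster single pass).

-- ===== PORT A =====
-- len(item.split()) as a Python int
def pvLenInt (s : String) : Int := ((PySem.Str.split₀ s).length : Int)

def Continuous_phrase_clean (context : List String) : List String :=
  -- for index, item in enumerate(context): Continuous_phrase_index.append(index); Continuous_phrase_len.append(len(item.split()))
  let il := (PySem.List.enumerate context).foldl
      (fun (st : List Int × List Int) p => (st.1 ++ [p.1], st.2 ++ [pvLenInt p.2])) ([], [])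
  -- for i, length in enumerate(Continuous_phrase_len): …
  -- Continuous_phrase_index[i] is always in range here, so pyGetD with default 0 is exact
  let dt := (PySem.List.enumerate il.2).foldl
      (fun (st : List Int × List Int) p =>
        if p.2 < 20 then (st.1, st.2 ++ [PySem.List.pyGetD il.1 p.1 0])
        else (if 5 ≤ st.2.length then st.1 ++ st.2 else st.1, []))
      ([], [])
  let del := if 5 ≤ dt.2.length then dt.1 ++ dt.2 else dt.1
  -- [item for i, item in enumerate(context) if i not in del_indices]
  ((PySem.List.enumerate context).filter (fun p => !(del.contains p.1))).map (·.2)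

-- ===== PORT B =====
-- key: len(x.split()) < 20  ("short" segment)
def pvKey (s : String) : Bool := decide ((PySem.Str.split₀ s).length < 20)

-- one pass over maximal runs of equal key (the two while loops of Source B:
-- the inner while advances j to the end of the current run = takeWhile/dropWhile span)
def Continuous_phrase_clean_alt (context : List String) : List String :=
  match context with
  | [] => []
  | x :: xs =>
    (if pvKey x && decide (5 ≤ (x :: xs.takeWhile (fun y => pvKey y == pvKey x)).length)
     then []
     else x :: xs.takeWhile (fun y => pvKey y == pvKey x))
    ++ Continuous_phrase_clean_alt (xs.dropWhile (fun y => pvKey y == pvKey x))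
termination_by context.length
decreasing_by simpa using Nat.lt_succ_of_le (List.length_dropWhile_le _ _)

-- ===== PRECONDITION & SPEC =====
def Spec_Continuous_phrase_clean (context : List String) (out : List String) : Prop := out = Continuous_phrase_clean_alt context
instance (context : List String) (out : List String) : Decidable (Spec_Continuous_phrase_clean context out) := by unfold Spec_Continuous_phrase_clean; infer_instance

-- ===== CLAIM (what is proved, stated in full; the proofs are below) =====
def Claim_equal_Continuous_phrase_clean : Prop := ∀ (context : List String), Dom_Continuous_phrase_clean context → Spec_Continuous_phrase_clean context (Continuous_phrase_clean context)

-- ===== LEMMAS AND PROOFS =====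

-- A's second loop body, with the (always-in-range) list indexing already resolved to the index itself
def pvB (st : List Int × List Int) (p : Int × String) : List Int × List Int :=
  if pvLenInt p.2 < 20 then (st.1, st.2 ++ [p.1])
  else (if 5 ≤ st.2.length then st.1 ++ st.2 else st.1, [])

-- A's del_indices, as a function of the segment list and the starting index
def pvDel (xs : List String) (s : Int) : List Int :=
  let dt := (PySem.List.enumerate xs s).foldl pvB ([], [])
  if 5 ≤ dt.2.length then dt.1 ++ dt.2 else dt.1

lemma pv_foldl_pair (l : List (Int × String)) (a b : List Int) :
    l.foldl (fun (st : List Int × List Int) p => (st.1 ++ [p.1], st.2 ++ [pvLenInt p.2])) (a, b)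
      = (a ++ l.map (·.1), b ++ l.map (fun p => pvLenInt p.2)) := by
  induction l generalizing a b with
  | nil => simp
  | cons p l ih => simp [ih]

lemma pv_enumerate_map {α β : Type} (f : α → β) (xs : List α) (s : Int) :
    PySem.List.enumerate (xs.map f) s = (PySem.List.enumerate xs s).map (fun p => (p.1, f p.2)) := by
  induction xs generalizing s with
  | nil => simp
  | cons x xs ih => simp [PySem.List.enumerate_cons, ih]

-- A's result, written with pvDel
lemma pvA_eq (context : List String) :
    Continuous_phrase_clean context
      = ((PySem.List.enumerate context).filter
          (fun p => !((pvDel context 0).contains p.1))).map (·.2) := by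
  unfold Continuous_phrase_clean pvDel
  rw [pv_foldl_pair]
  have hfst : (PySem.List.enumerate context).map (·.1)
      = PySem.List.pyRange 0 (0 + context.length) 1 := PySem.List.map_fst_enumerate ..
  have hsnd : (PySem.List.enumerate context).map (fun p => pvLenInt p.2)
      = context.map pvLenInt := by
    rw [show (fun (p : Int × String) => pvLenInt p.2) = pvLenInt ∘ (·.2) from rfl,
        ← List.map_map, PySem.List.map_snd_enumerate]
  simp only [hfst, hsnd, List.nil_append]
  rw [pv_enumerate_map, List.foldl_map]
  have hcongr : ((PySem.List.enumerate context).foldl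
      (fun (st : List Int × List Int) (p : Int × String) =>
        if pvLenInt p.2 < 20 then
          (st.1, st.2 ++ [PySem.List.pyGetD (PySem.List.pyRange 0 (0 + (context.length : Int)) 1) p.1 0])
        else (if 5 ≤ st.2.length then st.1 ++ st.2 else st.1, [])) ([], []))
      = (PySem.List.enumerate context).foldl pvB ([], []) := by
    apply PySem.List.foldl_congr_mem
    intro acc x hx
    rcases (PySem.List.mem_enumerate_iff _ _ _).mp hx with ⟨k, hk, rfl⟩
    simp only [pvB]
    have : PySem.List.pyGetD (PySem.List.pyRange 0 (0 + context.length) 1) (0 + (k : Int)) 0 = 0 + (k : Int) := by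
      rw [PySem.List.pyGetD_eq_getElem _ 0 (by omega)
        (by rw [PySem.List.length_pyRange_one]; omega)]
      rw [PySem.List.getElem_pyRange_one]
      omega
    rw [this]
  rw [hcongr]

-- prefix lemma: the accumulated del list is a prefix that is only appended to
lemma pv_foldl_prefix (l : List (Int × String)) (a t : List Int) :
    l.foldl pvB (a, t) = (a ++ (l.foldl pvB ([], t)).1, (l.foldl pvB ([], t)).2) := by
  induction l generalizing a t with
  | nil => simp
  | cons p l ih =>
    simp only [List.foldl_cons, pvB]
    split_ifs with h1 h2
    · exact ih a (t ++ [p.1])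
    · rw [ih (a ++ t) [], ih ([] ++ t) []]; simp
    · rw [ih a []]

-- a run of short segments only extends temp with its indices
lemma pv_run_true (g : List String) (hg : ∀ y ∈ g, pvKey y = true) (s : Int) (a t : List Int) :
    (PySem.List.enumerate g s).foldl pvB (a, t)
      = (a, t ++ PySem.List.pyRange s (s + g.length) 1) := by
  induction g generalizing s t with
  | nil => simp [PySem.List.pyRange_one_eq_nil]
  | cons y g ih =>
    have hy : pvLenInt y < 20 := by
      have h := hg y (by simp)
      simp only [pvKey, decide_eq_true_eq] at h
      simp only [pvLenInt]; exact_mod_cast h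
    simp only [PySem.List.enumerate_cons, List.foldl_cons, pvB, if_pos hy]
    rw [ih (fun z hz => hg z (by simp [hz])) (s + 1) (t ++ [s])]
    have hlen : s + ((y :: g).length : Int) = (s + 1) + (g.length : Int) := by
      simp only [List.length_cons]; push_cast; ring
    have hcons := PySem.List.pyRange_one_cons (a := s) (b := s + 1 + (g.length : Int)) (by omega)
    rw [hlen, hcons]
    simp

-- a run of long segments from empty temp leaves the state unchanged
lemma pv_run_false (g : List String) (hg : ∀ y ∈ g, pvKey y = false) (s : Int) (a : List Int) :
    (PySem.List.enumerate g s).foldl pvB (a, []) = (a, []) := by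
  induction g generalizing s with
  | nil => simp
  | cons y g ih =>
    have hy : ¬ pvLenInt y < 20 := by
      have h := hg y (by simp)
      simp only [pvKey, decide_eq_false_iff_not, not_lt] at h
      simp only [pvLenInt, not_lt]; exact_mod_cast h
    simp only [PySem.List.enumerate_cons, List.foldl_cons, pvB, if_neg hy]
    simpa using ih (fun z hz => hg z (by simp [hz])) (s + 1)

-- every recorded index is ≥ the starting index (or came from temp)
lemma pv_fold_bound (xs : List String) : ∀ (s : Int) (t : List Int) (j : Int),
    (j ∈ ((PySem.List.enumerate xs s).foldl pvB ([], t)).1 ∨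
     j ∈ ((PySem.List.enumerate xs s).foldl pvB ([], t)).2) → j ∈ t ∨ s ≤ j := by
  induction xs with
  | nil => intro s t j h; exact Or.inl (by simpa using h)
  | cons x xs ih =>
    intro s t j h
    rw [PySem.List.enumerate_cons, List.foldl_cons] at h
    by_cases hx : pvLenInt x < 20
    · simp only [pvB, if_pos hx] at h
      rcases ih (s + 1) (t ++ [s]) j h with h' | h'
      · rcases List.mem_append.mp h' with h'' | h''
        · exact Or.inl h''
        · simp only [List.mem_singleton] at h''; right; omega
      · right; omega
    · simp only [pvB, if_neg hx] at h
      rw [pv_foldl_prefix] at h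
      rcases h with h' | h'
      · rcases List.mem_append.mp h' with h'' | h''
        · left; revert h''; split_ifs <;> simp
        · have := ih (s + 1) [] j (Or.inl h''); simp at this; right; omega
      · have := ih (s + 1) [] j (Or.inr h'); simp at this; right; omega

lemma pv_del_bound (xs : List String) (s : Int) :
    ∀ j ∈ pvDel xs s, s ≤ j := by
  intro j hj
  unfold pvDel at hj
  simp only at hj
  have : j ∈ ((PySem.List.enumerate xs s).foldl pvB ([], [])).1 ∨
      j ∈ ((PySem.List.enumerate xs s).foldl pvB ([], [])).2 := by
    revert hj; split_ifs <;> intro hj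
    · exact List.mem_append.mp hj
    · exact Or.inl hj
  have := pv_fold_bound xs s [] j this
  simpa using this

lemma pv_del_decomp (k : Bool) (g rest : List String)
    (hgk : ∀ y ∈ g, pvKey y = k)
    (hrest : rest = [] ∨ ∃ r rs, rest = r :: rs ∧ pvKey r = !k) (s : Int) :
    pvDel (g ++ rest) s
      = (if k && decide (5 ≤ g.length) then PySem.List.pyRange s (s + g.length) 1 else [])
        ++ pvDel rest (s + g.length) := by
  have hRlen : (PySem.List.pyRange s (s + (g.length : Int)) 1).length = g.length := by
    rw [PySem.List.length_pyRange_one]; omega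
  unfold pvDel
  rw [PySem.List.enumerate_append, List.foldl_append]
  cases k with
  | false =>
    rw [pv_run_false g (fun y hy => hgk y hy) s []]
    simp
  | true =>
    rw [pv_run_true g (fun y hy => hgk y hy) s [] []]
    simp only [List.nil_append]
    rcases hrest with rfl | ⟨r, rs, rfl, hr⟩
    · simp [hRlen]
    · have hry : ¬ pvLenInt r < 20 := by
        simp only [pvKey, Bool.not_true, decide_eq_false_iff_not, not_lt] at hr
        simp only [pvLenInt, not_lt]; exact_mod_cast hr
      simp only [PySem.List.enumerate_cons, List.foldl_cons, pvB, if_neg hry, hRlen]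
      rw [pv_foldl_prefix, pv_foldl_prefix ((PySem.List.enumerate rs (s + (g.length : Int) + 1))) [] []]
      simp only [List.length_nil, List.nil_append]
      split_ifs with h1 h2 h2 <;> simp_all <;> omega


theorem pv_main : ∀ (n : Nat) (xs : List String), xs.length ≤ n → ∀ s : Int,
    ((PySem.List.enumerate xs s).filter (fun p => !((pvDel xs s).contains p.1))).map (·.2)
      = Continuous_phrase_clean_alt xs := by
  intro n
  induction n with
  | zero =>
    intro xs h s
    have hx : xs = [] := List.eq_nil_of_length_eq_zero (Nat.le_zero.mp h)
    subst hx
    simp [Continuous_phrase_clean_alt, pvDel]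
  | succ n ih =>
    intro xs hlen s
    match xs with
    | [] => simp [Continuous_phrase_clean_alt, pvDel]
    | x :: tl =>
      have hgk : ∀ y ∈ x :: tl.takeWhile (fun y => pvKey y == pvKey x), pvKey y = pvKey x := by
        intro y hy
        rcases List.mem_cons.mp hy with rfl | hy'
        · rfl
        · simpa using List.mem_takeWhile_imp hy'
      set f : String → Bool := fun y => pvKey y == pvKey x with hf
      set g : List String := x :: tl.takeWhile f with hgdef
      set rest : List String := tl.dropWhile f with hrdef
      have hsplit : x :: tl = g ++ rest := by
        rw [hgdef, hrdef]; simp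
      have hrest : rest = [] ∨ ∃ r rs, rest = r :: rs ∧ pvKey r = !pvKey x := by
        match hr : rest with
        | [] => exact Or.inl rfl
        | r :: rs =>
          refine Or.inr ⟨r, rs, rfl, ?_⟩
          have hdw : tl.dropWhile f = r :: rs := hrdef.symm
          have hne : tl.dropWhile f ≠ [] := by simp [hdw]
          have h2 := List.head_dropWhile_not f hne
          have h3 : (tl.dropWhile f).head hne = r := by simp [hdw]
          rw [h3] at h2
          simp only [hf, beq_eq_false_iff_ne, ne_eq] at h2
          exact (Bool.eq_not).mpr h2
      have hrlen : rest.length ≤ n := by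
        have h4 := List.length_dropWhile_le f tl
        rw [← hrdef] at h4
        simp only [List.length_cons] at hlen
        omega
      rw [hsplit, pv_del_decomp (pvKey x) g rest hgk hrest s]
      rw [PySem.List.enumerate_append, List.filter_append, List.map_append]
      set R := PySem.List.pyRange s (s + (g.length : Int)) 1 with hR
      set P' := if pvKey x && decide (5 ≤ g.length) then R else [] with hP
      set D := pvDel rest (s + (g.length : Int)) with hD
      have hDge := pv_del_bound rest (s + (g.length : Int))
      have hPlt : ∀ j ∈ P', j < s + (g.length : Int) := by
        intro j hj
        rw [hP] at hj
        split_ifs at hj with hc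
        · exact ((PySem.List.mem_pyRange_one).mp hj).2
        · simp at hj
      have hpart1 : ((PySem.List.enumerate g s).filter (fun p => !((P' ++ D).contains p.1))).map (·.2)
          = if pvKey x && decide (5 ≤ g.length) then [] else g := by
        by_cases hc : (pvKey x && decide (5 ≤ g.length)) = true
        · rw [if_pos hc]
          have : (PySem.List.enumerate g s).filter (fun p => !((P' ++ D).contains p.1)) = [] := by
            rw [List.filter_eq_nil_iff]
            intro p hp
            rcases (PySem.List.mem_enumerate_iff _ _ _).mp hp with ⟨k, hk, rfl⟩
            have hmem : (s + (k : Int)) ∈ P' := by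
              rw [hP, if_pos hc, hR, PySem.List.mem_pyRange_one]
              omega
            simp [List.contains_eq_mem, List.mem_append, hmem]
          rw [this]; simp
        · rw [if_neg hc]
          have : (PySem.List.enumerate g s).filter (fun p => !((P' ++ D).contains p.1))
              = PySem.List.enumerate g s := by
            rw [List.filter_eq_self]
            intro p hp
            rcases (PySem.List.mem_enumerate_iff _ _ _).mp hp with ⟨k, hk, rfl⟩
            have h5 : (s + (k : Int)) ∉ P' := by
              rw [hP, if_neg hc]; simp
            have h6 : (s + (k : Int)) ∉ D := by
              intro hmem
              have := hDge _ hmem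
              omega
            simp [List.contains_eq_mem, List.mem_append, h5, h6]
          rw [this, PySem.List.map_snd_enumerate]
      have hpart2 : (PySem.List.enumerate rest (s + (g.length : Int))).filter
            (fun p => !((P' ++ D).contains p.1))
          = (PySem.List.enumerate rest (s + (g.length : Int))).filter
            (fun p => !(D.contains p.1)) := by
        apply List.filter_congr
        intro p hp
        rcases (PySem.List.mem_enumerate_iff _ _ _).mp hp with ⟨k, hk, rfl⟩
        have h5 : (s + (g.length : Int) + (k : Int)) ∉ P' := by
          intro hmem
          have := hPlt _ hmem
          omega
        simp [List.contains_eq_mem, List.mem_append, h5]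
      rw [hpart1, hpart2, ih rest hrlen (s + (g.length : Int))]
      conv_rhs => rw [Continuous_phrase_clean_alt.eq_def, ← hsplit]

-- ===== VERDICT (by name: the statement is the Claim_ definition above) =====
theorem Continuous_phrase_clean_spec : Claim_equal_Continuous_phrase_clean := by
  intro context _
  unfold Spec_Continuous_phrase_clean
  rw [pvA_eq]
  exact pv_main context.length context le_rfl 0
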